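-- pv_equiv track=rewrite | github.com/Yehudit-AG/BimBot_AI | worker/worker/pipeline/processors/wall_candidates_processor.py | _analyze_wall_orientations
-- ===== SOURCE A (Python) =====
-- from typing import Dict, Any, List, Tuple, Optional
--
-- def _analyze_wall_orientations(wall_segments: List[Dict[str, Any]]) -> Dict[str, int]:
--     """Analyze wall orientations (mock implementation)."""
--     orientations = {'horizontal': 0, 'vertical': 0, 'diagonal': 0}
--
--     for segment in wall_segments:
--         orientation = segment.get('orientation', 'diagonal')
--         if orientation in orientations:
--             orientations[orientation] += 1
--         else:
--             orientations['diagonal'] += 1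
--
--     return orientations
-- ===== SOURCE B (Python) =====
-- def _analyze_wall_orientations(wall_segments):
--     """Count the two named orientations directly; diagonal is the complement."""
--     horizontal = sum(1 for s in wall_segments if s.get('orientation') == 'horizontal')
--     vertical = sum(1 for s in wall_segments if s.get('orientation') == 'vertical')
--     return {'horizontal': horizontal,
--             'vertical': vertical,
--             'diagonal': len(wall_segments) - horizontal - vertical}
-- ===== Notes on version B (the rewrite author's own statement) =====
-- stated objective: simpler
-- what changed: Replaces the per-element branch-and-increment into a mutable dict by two direct counts of the explicit categories plus deriving diagonal as the complement len - horizontal - vertical.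
import Mathlib
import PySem

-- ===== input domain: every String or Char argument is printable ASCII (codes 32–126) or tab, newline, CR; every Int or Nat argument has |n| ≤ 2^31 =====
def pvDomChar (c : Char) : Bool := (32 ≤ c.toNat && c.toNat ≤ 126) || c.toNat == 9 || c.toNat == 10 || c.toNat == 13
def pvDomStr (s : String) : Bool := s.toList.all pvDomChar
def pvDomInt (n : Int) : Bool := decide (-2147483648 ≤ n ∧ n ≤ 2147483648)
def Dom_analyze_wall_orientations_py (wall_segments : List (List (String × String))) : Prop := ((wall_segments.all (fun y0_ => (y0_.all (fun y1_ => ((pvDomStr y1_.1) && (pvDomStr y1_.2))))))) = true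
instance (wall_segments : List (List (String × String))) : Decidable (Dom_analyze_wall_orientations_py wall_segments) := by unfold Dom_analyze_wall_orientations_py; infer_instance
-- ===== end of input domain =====

-- B counts 'horizontal' and 'vertical' directly and derives 'diagonal' by complement (simpler decomposition, same O(n) cost).
-- ===== PORT A =====
-- loop body of A's for-loop, as a named helper
def pvStepA (d : PySem.Dict String Int) (segment : List (String × String)) : PySem.Dict String Int :=
  let orientation := (PySem.Dict.mk segment).getD "orientation" "diagonal"
  if d.contains orientation then d.modify orientation 0 (· + 1)
  else d.modify "diagonal" 0 (· + 1)

def analyze_wall_orientations_py (wall_segments : List (List (String × String))) : List (String × Int) :=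
  let orientations : PySem.Dict String Int :=
    PySem.Dict.mk [("horizontal", 0), ("vertical", 0), ("diagonal", 0)]
  (wall_segments.foldl pvStepA orientations).items

-- ===== PORT B =====
def analyze_wall_orientations_py_alt (wall_segments : List (List (String × String))) : List (String × Int) :=
  let horizontal : Int :=
    (wall_segments.countP (fun s => (PySem.Dict.mk s).get? "orientation" == some "horizontal") : Nat)
  let vertical : Int :=
    (wall_segments.countP (fun s => (PySem.Dict.mk s).get? "orientation" == some "vertical") : Nat)
  [("horizontal", horizontal), ("vertical", vertical),
   ("diagonal", (wall_segments.length : Int) - horizontal - vertical)]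

-- ===== PRECONDITION & SPEC =====
def Spec_analyze_wall_orientations_py (wall_segments : List (List (String × String))) (out : List (String × Int)) : Prop := out = analyze_wall_orientations_py_alt wall_segments
instance (wall_segments : List (List (String × String))) (out : List (String × Int)) : Decidable (Spec_analyze_wall_orientations_py wall_segments out) := by unfold Spec_analyze_wall_orientations_py; infer_instance

-- ===== CLAIM (what is proved, stated in full; the proofs are below) =====
def Claim_equal_analyze_wall_orientations_py : Prop := ∀ (wall_segments : List (List (String × String))), Dom_analyze_wall_orientations_py wall_segments → Spec_analyze_wall_orientations_py wall_segments (analyze_wall_orientations_py wall_segments)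

-- ===== LEMMAS AND PROOFS =====



-- ===== LEMMAS =====
theorem pv_step_eq (a b c : Int) (s : List (String × String)) :
    pvStepA (PySem.Dict.mk [("horizontal", a), ("vertical", b), ("diagonal", c)]) s
    = (if (PySem.Dict.mk s).get? "orientation" = some "horizontal" then
         PySem.Dict.mk [("horizontal", a + 1), ("vertical", b), ("diagonal", c)]
       else if (PySem.Dict.mk s).get? "orientation" = some "vertical" then
         PySem.Dict.mk [("horizontal", a), ("vertical", b + 1), ("diagonal", c)]
       else PySem.Dict.mk [("horizontal", a), ("vertical", b), ("diagonal", c + 1)]) := by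
  unfold pvStepA
  have hgd : (PySem.Dict.mk s).getD "orientation" "diagonal"
      = ((PySem.Dict.mk s).get? "orientation").getD "diagonal" :=
    PySem.Dict.getD_eq_get?_getD _ _ _
  rcases hq : (PySem.Dict.mk s).get? "orientation" with _ | o
  · simp only [hgd, hq, Option.getD_none]
    apply PySem.Dict.ext
    simp [PySem.Dict.contains, PySem.Dict.modify, PySem.Dict.getD, PySem.Dict.get?,
      PySem.Dict.insert]
  · simp only [hgd, hq, Option.getD_some]
    by_cases hH : o = "horizontal"
    · subst hH
      apply PySem.Dict.ext
      simp [PySem.Dict.contains, PySem.Dict.modify, PySem.Dict.getD, PySem.Dict.get?,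
        PySem.Dict.insert]
    · by_cases hV : o = "vertical"
      · subst hV
        apply PySem.Dict.ext
        simp [PySem.Dict.contains, PySem.Dict.modify, PySem.Dict.getD, PySem.Dict.get?,
          PySem.Dict.insert]
      · by_cases hD : o = "diagonal"
        · subst hD
          apply PySem.Dict.ext
          simp [PySem.Dict.contains, PySem.Dict.modify, PySem.Dict.getD, PySem.Dict.get?,
            PySem.Dict.insert]
        · apply PySem.Dict.ext
          simp [PySem.Dict.contains, PySem.Dict.modify, PySem.Dict.getD, PySem.Dict.get?,
            PySem.Dict.insert, hH, hV,
            show ("horizontal" == o) = false from by simp [Ne.symm hH],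
            show ("vertical" == o) = false from by simp [Ne.symm hV],
            show ("diagonal" == o) = false from by simp [Ne.symm hD]]

theorem pv_loop (ws : List (List (String × String))) : ∀ (a b c : Int),
    (ws.foldl pvStepA (PySem.Dict.mk [("horizontal", a), ("vertical", b), ("diagonal", c)])).items
    = [("horizontal", a + (ws.countP (fun s => (PySem.Dict.mk s).get? "orientation" == some "horizontal") : Nat)),
       ("vertical", b + (ws.countP (fun s => (PySem.Dict.mk s).get? "orientation" == some "vertical") : Nat)),
       ("diagonal", c + ((ws.length : Int)
          - (ws.countP (fun s => (PySem.Dict.mk s).get? "orientation" == some "horizontal") : Nat)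
          - (ws.countP (fun s => (PySem.Dict.mk s).get? "orientation" == some "vertical") : Nat)))] := by
  induction ws with
  | nil => intro a b c; simp
  | cons s ws ih =>
    intro a b c
    rw [List.foldl_cons, pv_step_eq]
    by_cases hH : (PySem.Dict.mk s).get? "orientation" = some "horizontal"
    · have hV : ¬ (PySem.Dict.mk s).get? "orientation" = some "vertical" := by simp [hH]
      rw [if_pos hH, ih]
      simp [hH]
      all_goals omega
    · by_cases hV : (PySem.Dict.mk s).get? "orientation" = some "vertical"
      · rw [if_neg hH, if_pos hV, ih]
        simp [hV]
        all_goals omega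
      · rw [if_neg hH, if_neg hV, ih]
        simp [hH, hV]
        all_goals omega

-- ===== VERDICT =====
theorem analyze_wall_orientations_py_spec : Claim_equal_analyze_wall_orientations_py := by
  intro ws _
  unfold Spec_analyze_wall_orientations_py analyze_wall_orientations_py analyze_wall_orientations_py_alt
  simp only [pv_loop, zero_add]
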